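-- pv_equiv track=rewrite | github.com/mkluza/Python | zestaw_4 - M.Kluza.py | miarka
-- ===== SOURCE A (Python) =====
-- def miarka(x):
--     miarka = "|"
--     skala = "0"
--
--     for i in range(x):
--         miarka += "....|"
--         if i < 9:
--             skala += ("    " + str(i + 1))
--         else:
--             skala += ("   " + str(i + 1))
--     calosc = miarka + "\n" + skala
--     return calosc
-- ===== SOURCE B (Python) =====
-- def miarka(x):
--     linia = "|" + "".join("|" if j % 5 == 0 else "." for j in range(1, 5 * x + 1))
--     parts = []
--     n = x
--     while n >= 1:
--         parts.append(str(n))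
--         parts.append("    " if n <= 9 else "   ")
--         n -= 1
--     skala = "0" + "".join(reversed(parts))
--     return linia + "\n" + skala
-- ===== Notes on version B (the rewrite author's own statement) =====
-- stated objective: alternative
-- what changed: Ruler line computed character-by-character from a modular position test instead of appending a tick segment per step, and the scale line built by a countdown loop collecting tokens back-to-front and reversing, instead of A's single forward loop interleaving both lines.
import Mathlib
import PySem

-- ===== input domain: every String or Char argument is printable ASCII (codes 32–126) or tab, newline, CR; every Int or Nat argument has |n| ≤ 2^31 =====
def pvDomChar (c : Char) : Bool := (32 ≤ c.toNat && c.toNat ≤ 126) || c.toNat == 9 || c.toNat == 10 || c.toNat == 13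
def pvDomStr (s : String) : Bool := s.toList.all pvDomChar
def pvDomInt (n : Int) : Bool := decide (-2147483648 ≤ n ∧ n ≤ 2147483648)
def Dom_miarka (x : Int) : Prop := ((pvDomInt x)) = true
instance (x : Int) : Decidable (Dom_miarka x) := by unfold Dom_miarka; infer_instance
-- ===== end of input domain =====

-- B computes the ruler line per character by the modular formula j%5==0 and builds the scale
-- line by a countdown loop collecting tokens back-to-front, instead of A's single forward
-- loop interleaving both lines (objective: alternative; same cost).

-- ===== PORT A =====
-- A's loop body: appends "....|" to the ruler and the (conditionally padded) number to the scale.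
def miarkaStepA (p : List Char × List Char) (i : Int) : List Char × List Char :=
  (p.1 ++ "....|".toList,
   if i < 9 then p.2 ++ ("    ".toList ++ PySem.Int.toChars (i + 1))
   else p.2 ++ ("   ".toList ++ PySem.Int.toChars (i + 1)))

def miarka (x : Int) : String :=
  let p := (PySem.List.pyRange 0 x 1).foldl miarkaStepA ("|".toList, "0".toList)
  String.ofList (p.1 ++ '\n' :: p.2)

-- ===== PORT B =====
-- "|" if j % 5 == 0 else "."  (j positive here; PySem.Int.mod is Python's %)
def miarkaCharB (j : Int) : Char :=
  if PySem.Int.mod j 5 = 0 then '|' else '.'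

-- the while loop: parts.append(str(n)); parts.append(pad); n -= 1  — until n < 1
def miarkaLoopB (n : Int) (parts : List (List Char)) : List (List Char) :=
  if _h : 1 ≤ n then
    miarkaLoopB (n - 1)
      (parts ++ [PySem.Int.toChars n, if n ≤ 9 then "    ".toList else "   ".toList])
  else parts
termination_by n.toNat
decreasing_by omega

def miarka_alt (x : Int) : String :=
  let linia := '|' :: (PySem.List.pyRange 1 (5 * x + 1) 1).map miarkaCharB
  let skala := '0' :: ((miarkaLoopB x []).reverse).flatten
  String.ofList (linia ++ '\n' :: skala)

-- ===== PRECONDITION & SPEC =====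
def Spec_miarka (x : Int) (out : String) : Prop := out = miarka_alt x
instance (x : Int) (out : String) : Decidable (Spec_miarka x out) := by unfold Spec_miarka; infer_instance

-- ===== CLAIM (what is proved, stated in full; the proofs are below) =====
def Claim_equal_miarka : Prop := ∀ (x : Int), Dom_miarka x → Spec_miarka x (miarka x)

-- ===== LEMMAS AND PROOFS =====

-- the scale piece for number n, as A produces it
def miarkaPiece (n : Int) : List Char :=
  (if n ≤ 9 then "    ".toList else "   ".toList) ++ PySem.Int.toChars n

-- A's fold over range(n) with arbitrary accumulators, in closed form.
theorem miarka_foldA (n : Nat) (m s : List Char) :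
    (PySem.List.pyRange 0 (n : Int) 1).foldl miarkaStepA (m, s)
      = (m ++ (List.replicate n "....|".toList).flatten,
         s ++ ((List.range n).map (fun k : Nat => miarkaPiece ((k : Int) + 1))).flatten) := by
  induction n generalizing m s with
  | zero => simp [PySem.List.pyRange]
  | succ n ih =>
    rw [show ((n + 1 : Nat) : Int) = ((n : Int)) + 1 by push_cast; ring,
      PySem.List.pyRange_one_succ_right (by positivity), List.foldl_append, ih,
      List.range_succ]
    simp only [List.foldl_cons, List.foldl_nil, List.map_append, List.map_cons, List.map_nil,
      List.replicate_succ', List.flatten_append]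
    by_cases h9 : (n : Int) < 9
    · simp [miarkaStepA, miarkaPiece, h9, show (n : Int) + 1 ≤ 9 by omega]
    · simp [miarkaStepA, miarkaPiece, h9, show ¬((n : Int) + 1 ≤ 9) by omega]

-- B's ruler characters over 1..5n are A's "....|" repeated n times.
theorem miarka_rulerB (n : Nat) :
    (PySem.List.pyRange 1 (5 * (n : Int) + 1) 1).map miarkaCharB
      = (List.replicate n "....|".toList).flatten := by
  induction n with
  | zero => decide
  | succ n ih =>
    have h : PySem.List.pyRange 1 (5 * ((n + 1 : Nat) : Int) + 1) 1
        = PySem.List.pyRange 1 (5 * (n : Int) + 1) 1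
          ++ PySem.List.pyRange (5 * (n : Int) + 1) (5 * ((n + 1 : Nat) : Int) + 1) 1 :=
      PySem.List.pyRange_one_append _ _ _ (by omega) (by push_cast; omega)
    rw [h, List.map_append, ih, List.replicate_succ', List.flatten_append]
    congr 1
    rw [PySem.List.pyRange_one_cons (by push_cast; omega),
      PySem.List.pyRange_one_cons (by push_cast; omega),
      PySem.List.pyRange_one_cons (by push_cast; omega),
      PySem.List.pyRange_one_cons (by push_cast; omega),
      PySem.List.pyRange_one_cons (by push_cast; omega),
      PySem.List.pyRange_one_eq_nil (by push_cast; omega)]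
    simp only [List.map_cons, List.map_nil, miarkaCharB]
    rw [if_neg (by rw [PySem.Int.mod_eq_emod_of_pos (by norm_num)]; omega),
      if_neg (by rw [PySem.Int.mod_eq_emod_of_pos (by norm_num)]; omega),
      if_neg (by rw [PySem.Int.mod_eq_emod_of_pos (by norm_num)]; omega),
      if_neg (by rw [PySem.Int.mod_eq_emod_of_pos (by norm_num)]; omega),
      if_pos (by rw [PySem.Int.mod_eq_emod_of_pos (by norm_num)]; omega)]
    rfl

-- the ascending token list [pad 1, str 1, …, pad n, str n]
def miarkaAsc : Nat → List (List Char)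
  | 0 => []
  | n + 1 => miarkaAsc n
      ++ [(if ((n : Int) + 1) ≤ 9 then "    ".toList else "   ".toList),
          PySem.Int.toChars ((n : Int) + 1)]

-- B's countdown loop in closed form: it appends the tokens of n…1 in descending order.
theorem miarka_loopB (n : Nat) (acc : List (List Char)) :
    miarkaLoopB (n : Int) acc = acc ++ (miarkaAsc n).reverse := by
  induction n generalizing acc with
  | zero => rw [miarkaLoopB]; simp [miarkaAsc]
  | succ n ih =>
    rw [miarkaLoopB]
    rw [dif_pos (by push_cast; omega)]
    rw [show ((n + 1 : Nat) : Int) - 1 = (n : Int) by push_cast; ring, ih]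
    simp [miarkaAsc]

theorem miarka_ascFlatten (n : Nat) :
    ((miarkaAsc n).reverse.reverse).flatten
      = ((List.range n).map (fun k : Nat => miarkaPiece ((k : Int) + 1))).flatten := by
  rw [List.reverse_reverse]
  induction n with
  | zero => rfl
  | succ n ih =>
    rw [miarkaAsc, List.range_succ, List.flatten_append, ih, List.map_append]
    simp [miarkaPiece]

theorem miarka_loop_neg {x : Int} (hx : x < 0) :
    PySem.List.pyRange 0 x 1 = [] ∧ PySem.List.pyRange 1 (5 * x + 1) 1 = []
      ∧ miarkaLoopB x [] = [] := by
  refine ⟨by simp [PySem.List.pyRange]; omega, by simp [PySem.List.pyRange]; omega, ?_⟩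
  rw [miarkaLoopB, dif_neg (by omega)]

-- ===== VERDICT (by name: the statement is the Claim_ definition above) =====
theorem miarka_spec : Claim_equal_miarka := by
  intro x _
  unfold Spec_miarka miarka miarka_alt
  by_cases hx : 0 ≤ x
  · have hn : x = ((x.toNat : Nat) : Int) := (Int.toNat_of_nonneg hx).symm
    rw [hn, miarka_foldA, miarka_rulerB, miarka_loopB, List.nil_append, miarka_ascFlatten]
    rfl
  · obtain ⟨h0, h1, h2⟩ := miarka_loop_neg (by omega : x < 0)
    rw [h0, h1, h2]
    simp
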